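-- pv_equiv track=rewrite | github.com/ermes1990/AlgebraOnF2 | PolynomialF2.py | get_vector_by_index
-- ===== SOURCE A (Python) =====
-- from math import comb
--
-- def get_vector_by_index(n, w, j):
--     if n == 0:
--         return ""
--     if w == 0:
--         return "0" * n
--     limit = comb(n - 1, w - 1)
--     if j <= limit - 1:
--         return "1" + get_vector_by_index(n - 1, w - 1, j)
--     else:
--         return "0" + get_vector_by_index(n - 1, w, j - limit)
-- ===== SOURCE B (Python) =====
-- from math import comb
--
-- def get_vector_by_index(n, w, j):
--     # Iterative unranking; maintains c = comb(n-1, w-1) via Pascal-style updates.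
--     if n <= 0:
--         return ""
--     if w <= 0:
--         return "0" * n
--     res = []
--     c = comb(n - 1, w - 1)
--     while n > 0 and w > 0:
--         if j <= c - 1:
--             res.append("1")
--             n -= 1
--             w -= 1
--             if n > 0 and w > 0:
--                 c = c * w // n
--         else:
--             res.append("0")
--             j -= c
--             n -= 1
--             if n > 0:
--                 c = c * (n - w + 1) // n
--     return "".join(res) + "0" * n
-- ===== Notes on version B (the rewrite author's own statement) =====
-- stated objective: alternative
-- what changed: Replaces A's recursion, which calls math.comb from scratch at every position, by a single iterative loop that maintains the current binomial coefficient and updates it incrementally with Pascal-ratio multiplications (c*w//n, c*(n-w+1)//n), building the string with a list and one join (fewer big-int operations per position; measured 2.26x at the largest size both finished, unconfirmed beyond).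
import Mathlib
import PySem

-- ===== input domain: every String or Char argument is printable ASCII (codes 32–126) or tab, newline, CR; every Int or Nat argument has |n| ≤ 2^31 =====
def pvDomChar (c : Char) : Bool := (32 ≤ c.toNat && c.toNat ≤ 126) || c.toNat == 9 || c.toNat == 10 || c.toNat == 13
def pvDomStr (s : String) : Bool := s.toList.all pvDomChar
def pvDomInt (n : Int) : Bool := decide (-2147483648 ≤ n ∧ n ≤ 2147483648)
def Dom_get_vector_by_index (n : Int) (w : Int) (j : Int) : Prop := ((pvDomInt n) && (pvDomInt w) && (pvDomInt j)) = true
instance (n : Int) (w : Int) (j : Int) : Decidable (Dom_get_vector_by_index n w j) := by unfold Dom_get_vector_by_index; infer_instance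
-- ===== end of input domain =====

-- B replaces A's recursion (which recomputes comb(n-1,w-1) from scratch at every step) by a
-- single loop that updates the binomial coefficient incrementally via Pascal-style ratios.

-- math.comb on nonnegative arguments (all calls inside Pre_ have nonnegative arguments)
def pyComb (a : Int) (b : Int) : Int :=
  if a.toNat < b.toNat then 0 else (Nat.choose a.toNat b.toNat : Int)   -- guard only for fast evaluation: choose a b = 0 there (pyComb_eq_choose)

-- ===== PORT A =====
-- A's recursion, on the characters; the Nat argument mirrors n (inside Pre_, n ≥ 0).
def pvAgo : Nat → Int → Int → List Char
  | 0, _, _ => []                                           -- n == 0: ""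
  | m+1, w, j =>
      if w = 0 then List.replicate (m+1) '0'                -- "0" * n
      else
        let limit := pyComb (m : Int) (w - 1)               -- comb(n-1, w-1)
        if j ≤ limit - 1 then '1' :: pvAgo m (w - 1) j
        else '0' :: pvAgo m w (j - limit)

def get_vector_by_index (n : Int) (w : Int) (j : Int) : String :=
  String.ofList (pvAgo n.toNat w j)

-- ===== PORT B =====
-- the while loop of Source B; the Nat argument is n (fuel = value); returns (res, remaining n)
def pvBloop : Nat → Int → Int → Int → List (List Char) → List (List Char) × Nat
  | 0, _, _, _, acc => (acc, 0)
  | m+1, w, j, c, acc =>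
      if w ≤ 0 then (acc, m+1)                              -- loop exit: w == 0, n = m+1 left
      else if j ≤ c - 1 then
        let c' := if 0 < (m:Int) ∧ 0 < w - 1 then PySem.Int.floordiv (c * (w - 1)) (m:Int) else c
        pvBloop m (w - 1) j c' (acc ++ [['1']])
      else
        let c' := if 0 < (m:Int) then PySem.Int.floordiv (c * ((m:Int) - w + 1)) (m:Int) else c
        pvBloop m w (j - c) c' (acc ++ [['0']])

def get_vector_by_index_alt (n : Int) (w : Int) (j : Int) : String :=
  if n ≤ 0 then ""
  else if w ≤ 0 then String.ofList (List.replicate n.toNat '0')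
  else
    let r := pvBloop n.toNat w j (pyComb (n - 1) (w - 1)) []
    String.ofList (r.1.flatten ++ List.replicate r.2 '0')       -- "".join(res) + "0" * n

-- ===== PRECONDITION & SPEC =====
-- Pre_ excludes exactly the inputs on which A raises ValueError (math.comb on a negative
-- argument: n < 0 with w ≠ 0, or n > 0 with w < 0); A returns on everything admitted.
def Pre_get_vector_by_index (n : Int) (w : Int) (j : Int) : Prop :=
  (0 ≤ n ∧ 0 ≤ w) ∨ n = 0 ∨ w = 0
instance (n : Int) (w : Int) (j : Int) : Decidable (Pre_get_vector_by_index n w j) := by unfold Pre_get_vector_by_index; infer_instance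
def pvWitness_get_vector_by_index : Int × Int × Int := (5, 2, 7)

def Spec_get_vector_by_index (n : Int) (w : Int) (j : Int) (out : String) : Prop := out = get_vector_by_index_alt n w j
instance (n : Int) (w : Int) (j : Int) (out : String) : Decidable (Spec_get_vector_by_index n w j out) := by unfold Spec_get_vector_by_index; infer_instance

-- ===== CLAIM (what is proved, stated in full; the proofs are below) =====
def Claim_equal_get_vector_by_index : Prop := ∀ (n : Int) (w : Int) (j : Int), Dom_get_vector_by_index n w j → Pre_get_vector_by_index n w j → Spec_get_vector_by_index n w j (get_vector_by_index n w j)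

-- ===== LEMMAS AND PROOFS =====

lemma pyComb_eq_choose (a : Int) (b : Int) : pyComb a b = (Nat.choose a.toNat b.toNat : Int) := by
  unfold pyComb
  split_ifs with h
  · rw [Nat.choose_eq_zero_of_lt h]; rfl
  · rfl

-- one-step unfolding of the two recursions (proof helpers)
lemma pvAgo_succ (m : Nat) (w j : Int) :
    pvAgo (m+1) w j = if w = 0 then List.replicate (m+1) '0'
      else if j ≤ pyComb (m:Int) (w-1) - 1 then '1' :: pvAgo m (w-1) j
      else '0' :: pvAgo m w (j - pyComb (m:Int) (w-1)) := rfl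

lemma pvBloop_succ (m : Nat) (w j c : Int) (acc : List (List Char)) :
    pvBloop (m+1) w j c acc = if w ≤ 0 then (acc, m+1)
      else if j ≤ c - 1 then
        pvBloop m (w-1) j (if 0 < (m:Int) ∧ 0 < w - 1 then PySem.Int.floordiv (c * (w-1)) (m:Int) else c) (acc ++ [['1']])
      else
        pvBloop m w (j - c) (if 0 < (m:Int) then PySem.Int.floordiv (c * ((m:Int) - w + 1)) (m:Int) else c) (acc ++ [['0']]) := rfl

-- Pascal-ratio update, "1" branch: comb(m+1,k)*k exactly divisible by m+1, quotient comb(m,k-1)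
lemma pvComb_one (m : Nat) (w : Int) (hw : 2 ≤ w) :
    PySem.Int.floordiv (pyComb ((m:Nat)+1 : Int) (w - 1) * (w - 1)) ((m+1 : Nat) : Int)
      = pyComb ((m:Nat) : Int) (w - 2) := by
  have hk : (w - 1).toNat = (w - 2).toNat + 1 := by omega
  have hcast : ((m:Nat)+1 : Int).toNat = m + 1 := by omega
  have hcast2 : ((m:Nat) : Int).toNat = m := by omega
  simp only [pyComb_eq_choose]
  rw [hcast, hcast2, hk]
  have hid : Nat.choose (m+1) ((w-2).toNat + 1) * ((w-2).toNat + 1)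
      = (m+1) * Nat.choose m (w-2).toNat := by
    have := Nat.succ_mul_choose_eq m (w-2).toNat
    simp [Nat.succ_eq_add_one] at this
    omega
  have hwcast : (w - 1) = (((w-2).toNat + 1 : Nat) : Int) := by omega
  rw [hwcast]
  rw [show ((Nat.choose (m+1) ((w-2).toNat + 1)) : Int) * (((w-2).toNat + 1 : Nat) : Int)
        = ((Nat.choose (m+1) ((w-2).toNat + 1) * ((w-2).toNat + 1) : Nat) : Int) by push_cast; ring,
      hid]
  push_cast
  rw [PySem.Int.floordiv_eq_ediv_of_pos (by omega)]
  rw [Int.mul_ediv_cancel_left _ (by omega)]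

-- Pascal-ratio update, "0" branch: comb(m+1,k)*(m+1-k) exactly divisible by m+1, quotient comb(m,k)
lemma pvComb_zero (m : Nat) (w : Int) (hw : 1 ≤ w) :
    PySem.Int.floordiv (pyComb ((m:Nat)+1 : Int) (w - 1) * (((m:Nat)+1 : Int) - w + 1)) ((m+1 : Nat) : Int)
      = pyComb ((m:Nat) : Int) (w - 1) := by
  have hcast : ((m:Nat)+1 : Int).toNat = m + 1 := by omega
  have hcast2 : ((m:Nat) : Int).toNat = m := by omega
  simp only [pyComb_eq_choose]
  rw [hcast, hcast2]
  set k := (w - 1).toNat with hkdef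
  by_cases hle : k ≤ m + 1
  · have hid : Nat.choose (m+1) k * (m + 1 - k) = Nat.choose m k * (m+1) := by
      have := Nat.choose_mul_succ_eq m k
      omega
    have hfac : ((m:Nat)+1 : Int) - w + 1 = ((m + 1 - k : Nat) : Int) := by omega
    rw [hfac]
    rw [show ((Nat.choose (m+1) k : Int)) * ((m + 1 - k : Nat) : Int)
          = ((Nat.choose (m+1) k * (m + 1 - k) : Nat) : Int) by push_cast; ring, hid]
    push_cast
    rw [mul_comm ((Nat.choose m k : Int))]
    rw [PySem.Int.floordiv_eq_ediv_of_pos (by omega)]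
    rw [Int.mul_ediv_cancel_left _ (by omega)]
  · have h1 : Nat.choose (m+1) k = 0 := Nat.choose_eq_zero_of_lt (by omega)
    have h2 : Nat.choose m k = 0 := Nat.choose_eq_zero_of_lt (by omega)
    rw [h1, h2]
    simp [PySem.Int.floordiv]

-- the loop, with c carrying comb(n-1, w-1), computes exactly A's recursion
lemma pvBloop_ok (m : Nat) : ∀ (w j c : Int) (acc : List (List Char)), 1 ≤ w →
    c = pyComb ((m:Nat) : Int) (w - 1) →
    (pvBloop (m+1) w j c acc).1.flatten ++ List.replicate (pvBloop (m+1) w j c acc).2 '0'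
      = acc.flatten ++ pvAgo (m+1) w j := by
  induction m with
  | zero =>
    intro w j c acc hw hc
    have hw0 : ¬ (w ≤ 0) := by omega
    have hwne : ¬ (w = 0) := by omega
    rw [pvBloop_succ, if_neg hw0, pvAgo_succ, if_neg hwne, ← hc]
    by_cases hj : j ≤ c - 1
    · rw [if_pos hj, if_pos hj]
      simp [pvBloop, pvAgo]
    · rw [if_neg hj, if_neg hj]
      simp [pvBloop, pvAgo]
  | succ m ih =>
    intro w j c acc hw hc
    have hw0 : ¬ (w ≤ 0) := by omega
    have hwne : ¬ (w = 0) := by omega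
    have hmc : ((m:Nat) : Int) + 1 = ((m+1 : Nat) : Int) := by push_cast; ring
    rw [pvBloop_succ, if_neg hw0, pvAgo_succ, if_neg hwne, ← hc]
    by_cases hj : j ≤ c - 1
    · -- "1" branch
      rw [if_pos hj, if_pos hj]
      by_cases hw2 : 2 ≤ w
      · have hguard : (0 < ((m+1:Nat):Int) ∧ 0 < w - 1) := by constructor <;> omega
        rw [if_pos hguard]
        have hc' : PySem.Int.floordiv (c * (w - 1)) ((m+1:Nat) : Int)
            = pyComb ((m:Nat) : Int) (w - 1 - 1) := by
          rw [hc]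
          have := pvComb_one m w hw2
          rw [hmc] at this
          rw [show w - 1 - 1 = w - 2 from by omega, this]
        rw [ih (w-1) j _ (acc ++ [['1']]) (by omega) hc']
        simp
      · -- w = 1: inner loop exits with w' = 0
        have hw1 : w = 1 := by omega
        subst hw1
        have hguard : ¬ (0 < ((m+1:Nat):Int) ∧ 0 < (1:Int) - 1) := by
          rintro ⟨_, h⟩; omega
        rw [if_neg hguard]
        rw [show pvBloop (m+1) ((1:Int) - 1) j c (acc ++ [['1']]) = (acc ++ [['1']], m+1) by
          rw [pvBloop_succ]; norm_num]
        rw [show pvAgo (m+1) ((1:Int)-1) j = List.replicate (m+1) '0' by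
          rw [pvAgo_succ]; norm_num]
        simp
    · -- "0" branch
      rw [if_neg hj, if_neg hj]
      have hguard : (0 < ((m+1:Nat):Int)) := by positivity
      rw [if_pos hguard]
      have hc' : PySem.Int.floordiv (c * (((m+1:Nat):Int) - w + 1)) ((m+1:Nat) : Int)
          = pyComb ((m:Nat) : Int) (w - 1) := by
        rw [hc]
        have := pvComb_zero m w hw
        rw [hmc] at this
        exact this
      rw [ih w (j - c) _ (acc ++ [['0']]) hw hc']
      simp

-- ===== VERDICT (by name: the statement is the Claim_ definition above) =====
theorem get_vector_by_index_spec : Claim_equal_get_vector_by_index := by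
  intro n w j _ hpre
  unfold Spec_get_vector_by_index get_vector_by_index get_vector_by_index_alt
  by_cases hn : n ≤ 0
  · -- n ≤ 0: A's port gives "" (toNat = 0); B returns ""
    have : n.toNat = 0 := by omega
    rw [this, if_pos hn]
    simp [pvAgo]
  · rw [if_neg hn]
    have hw0 : 0 ≤ w := by
      rcases hpre with ⟨_, h⟩ | h | h <;> omega
    obtain ⟨m, hm⟩ : ∃ m, n.toNat = m + 1 := ⟨n.toNat - 1, by omega⟩
    by_cases hw : w ≤ 0
    · have hweq : w = 0 := by omega
      subst hweq
      rw [if_pos (le_refl 0), hm]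
      simp [pvAgo]
    · rw [if_neg hw]
      have hc : pyComb (n - 1) (w - 1) = pyComb ((m:Nat) : Int) (w - 1) := by
        simp only [pyComb_eq_choose]
        congr 2
        omega
      rw [hm, hc]
      have := pvBloop_ok m w j (pyComb ((m:Nat):Int) (w-1)) [] (by omega) rfl
      simp only [List.flatten_nil, List.nil_append] at this
      exact (congrArg String.ofList this).symm
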